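-- pv_equiv track=rewrite | github.com/v-rathod/immigration-model-builder | scripts/test_rag_practical.py | find_qa
-- ===== SOURCE A (Python) =====
-- def find_qa(qa_cache, keywords, top_k=3):
--     """Find matching pre-computed Q&A pairs."""
--     kw_lower = [k.lower() for k in keywords]
--     results = []
--     for qa in qa_cache:
--         q = qa.get("question", "").lower()
--         score = sum(1 for k in kw_lower if k in q)
--         if score > 0:
--             results.append((score, qa))
--     results.sort(key=lambda x: -x[0])
--     return [qa for _, qa in results[:top_k]]
-- ===== SOURCE B (Python) =====
-- def find_qa(qa_cache, keywords, top_k=3):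
--     """Find matching pre-computed Q&A pairs by a descending-score selection sweep (no sort)."""
--     kw = [k.lower() for k in keywords]
--     scores = [sum(1 for k in kw if k in q)
--               for q in (qa.get("question", "").lower() for qa in qa_cache)]
--     present = set(scores)
--     out = []
--     for s in range(len(kw), 0, -1):
--         if s in present:
--             out.extend(qa for qa, sc in zip(qa_cache, scores) if sc == s)
--     return out[:top_k]
-- ===== Notes on version B (the rewrite author's own statement) =====
-- stated objective: alternative
-- what changed: B replaces A's collect-(score,qa)-pairs-then-stable-comparison-sort pipeline by a precomputed parallel score list and a descending selection sweep: for each possible score from len(keywords) down to 1 (skipping scores absent from the score set) it selects the matching entries in cache order, so no sort is performed and no tuple list is built.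
import Mathlib
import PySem

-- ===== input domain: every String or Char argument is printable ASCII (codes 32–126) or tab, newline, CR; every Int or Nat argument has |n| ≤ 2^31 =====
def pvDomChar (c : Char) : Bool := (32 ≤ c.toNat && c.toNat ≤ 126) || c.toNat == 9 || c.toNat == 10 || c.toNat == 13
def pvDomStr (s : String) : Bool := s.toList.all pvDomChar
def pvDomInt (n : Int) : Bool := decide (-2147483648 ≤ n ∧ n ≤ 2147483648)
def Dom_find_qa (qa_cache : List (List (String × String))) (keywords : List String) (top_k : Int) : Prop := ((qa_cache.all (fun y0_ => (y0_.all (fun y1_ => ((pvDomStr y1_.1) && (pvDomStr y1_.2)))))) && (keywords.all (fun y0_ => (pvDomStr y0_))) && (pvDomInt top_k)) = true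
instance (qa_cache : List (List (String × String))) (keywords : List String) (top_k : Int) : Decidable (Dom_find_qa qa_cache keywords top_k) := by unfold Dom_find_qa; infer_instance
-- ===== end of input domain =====

-- B replaces A's collect-then-stable-sort by precomputed scores plus a descending selection sweep (no sort); same results, similar cost.

-- ===== PORT A =====
def find_qa (qa_cache : List (List (String × String))) (keywords : List String) (top_k : Int) : List (List (String × String)) :=
  let kw_lower := keywords.map PySem.Str.lower
  let results := qa_cache.foldl (fun acc qa =>
      let q := PySem.Str.lower ((qa.lookup "question").getD "")
      let score := (kw_lower.map (fun k => if PySem.Str.isIn k q then (1 : Int) else 0)).sum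
      if 0 < score then acc ++ [(score, qa)] else acc) []
  let sortedr := PySem.List.sorted results (fun x => -x.1) false
  (PySem.List.slice sortedr none (some top_k)).map (fun p => p.2)

-- ===== PORT B =====
def find_qa_alt (qa_cache : List (List (String × String))) (keywords : List String) (top_k : Int) : List (List (String × String)) :=
  let kw := keywords.map PySem.Str.lower
  let scores := (qa_cache.map (fun qa => PySem.Str.lower ((qa.lookup "question").getD ""))).map
      (fun q => (kw.map (fun k => if PySem.Str.isIn k q then (1 : Int) else 0)).sum)
  let present := PySem.Set.ofList scores
  let out := (PySem.List.pyRange (PySem.List.len kw) 0 (-1)).foldl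
      (fun acc s =>
        if PySem.Set.contains present s then
          acc ++ ((qa_cache.zip scores).filter (fun p => p.2 == s)).map (fun p => p.1)
        else acc) []
  PySem.List.slice out none (some top_k)

-- ===== PRECONDITION & SPEC =====
def Spec_find_qa (qa_cache : List (List (String × String))) (keywords : List String) (top_k : Int) (out : List (List (String × String))) : Prop := out = find_qa_alt qa_cache keywords top_k
instance (qa_cache : List (List (String × String))) (keywords : List String) (top_k : Int) (out : List (List (String × String))) : Decidable (Spec_find_qa qa_cache keywords top_k out) := by unfold Spec_find_qa; infer_instance

-- ===== CLAIM (what is proved, stated in full; the proofs are below) =====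
def Claim_equal_find_qa : Prop := ∀ (qa_cache : List (List (String × String))) (keywords : List String) (top_k : Int), Dom_find_qa qa_cache keywords top_k → Spec_find_qa qa_cache keywords top_k (find_qa qa_cache keywords top_k)

-- ===== LEMMAS AND PROOFS =====

-- the match score of one qa entry (shared subcomputation of both ports, by zeta-reduction)
def scoreOf (kw : List String) (qa : List (String × String)) : Int :=
  (kw.map (fun k => if PySem.Str.isIn k (PySem.Str.lower ((qa.lookup "question").getD "")) then (1 : Int) else 0)).sum

lemma scoreOf_le (kw : List String) (qa : List (String × String)) :
    scoreOf kw qa ≤ (kw.length : Int) := by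
  unfold scoreOf
  rw [PySem.List.sum_map_ite_one_zero]
  exact_mod_cast List.countP_le_length

-- insertBy skips a prefix none of whose elements x goes before
lemma insertBy_append_left {α : Type} (before : α → α → Bool) (x : α) (L1 L2 : List α)
    (h : ∀ y ∈ L1, before x y = false) :
    PySem.List.insertBy before x (L1 ++ L2) = L1 ++ PySem.List.insertBy before x L2 := by
  induction L1 with
  | nil => simp
  | cons a t ih =>
    have ha : before x a = false := h a (by simp)
    cases t ++ L2 with
    | nil => simp [PySem.List.insertBy, ha] at *; simpa using ih (fun y hy => h y (by simp [hy]))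
    | cons b u =>
      simp only [List.cons_append]
      rw [show PySem.List.insertBy before x (a :: (t ++ L2)) =
            if before x a then x :: a :: (t ++ L2) else a :: PySem.List.insertBy before x (t ++ L2) from rfl]
      simp [ha, ih (fun y hy => h y (by simp [hy]))]

-- insertBy puts x in front when x goes before every element
lemma insertBy_all_before {α : Type} (before : α → α → Bool) (x : α) (L : List α)
    (h : ∀ y ∈ L, before x y = true) :
    PySem.List.insertBy before x L = x :: L := by
  cases L with
  | nil => rfl
  | cons a t =>
    have ha : before x a = true := h a (by simp)
    simp [PySem.List.insertBy, ha]

lemma fst_eq_of_mem_filter {Q : Type} (xs : List (Int × Q)) (s : Int) (y : Int × Q)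
    (hy : y ∈ xs.filter (fun p => p.1 == s)) : y.1 = s := by
  have := (List.mem_filter.mp hy).2
  simpa using this

-- MAIN LEMMA: a stable sort by descending score equals the concatenation of the
-- score buckets taken in strictly descending score order.
lemma sorted_eq_flatMap_buckets {Q : Type} (D : List Int) (hD : D.Pairwise (· > ·))
    (xs : List (Int × Q)) (hx : ∀ p ∈ xs, p.1 ∈ D) :
    PySem.List.sorted xs (fun p => -p.1) false =
      D.flatMap (fun s => xs.filter (fun p => p.1 == s)) := by
  rw [PySem.List.sorted_eq_foldl_insertBy]
  induction xs using List.reverseRecOn with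
  | nil => simp
  | append_singleton xs x ih =>
    have hxs : ∀ p ∈ xs, p.1 ∈ D := fun p hp => hx p (by simp [hp])
    have hxmem : x.1 ∈ D := hx x (by simp)
    obtain ⟨D1, D2, hsplit⟩ := List.append_of_mem hxmem
    subst hsplit
    have hpw := hD
    rw [List.pairwise_append] at hpw
    obtain ⟨hD1, hD2c, hcross⟩ := hpw
    rw [List.pairwise_cons] at hD2c
    have hD1gt : ∀ s ∈ D1, x.1 < s := fun s hs => hcross s hs x.1 (by simp)
    have hD2lt : ∀ s ∈ D2, s < x.1 := fun s hs => hD2c.1 s hs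
    rw [List.foldl_append, List.foldl_cons, List.foldl_nil, ih hxs]
    set g := fun s => xs.filter (fun p : Int × Q => p.1 == s) with hg
    set before := fun a b : Int × Q => decide (-a.1 < -b.1) with hbef
    have hflat : (D1 ++ x.1 :: D2).flatMap g =
        (D1.flatMap g ++ g x.1) ++ D2.flatMap g := by
      simp [List.flatMap_append]
    rw [hflat]
    have hpre : ∀ y ∈ D1.flatMap g ++ g x.1, before x y = false := by
      intro y hy
      rcases List.mem_append.mp hy with hy1 | hy2
      · obtain ⟨s, hs, hyf⟩ := List.mem_flatMap.mp hy1
        have := fst_eq_of_mem_filter xs s y hyf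
        have hgt := hD1gt s hs
        simp only [hbef, decide_eq_false_iff_not]
        omega
      · have := fst_eq_of_mem_filter xs x.1 y hy2
        simp only [hbef, decide_eq_false_iff_not]
        omega
    have hsuf : ∀ y ∈ D2.flatMap g, before x y = true := by
      intro y hy
      obtain ⟨s, hs, hyf⟩ := List.mem_flatMap.mp hy
      have := fst_eq_of_mem_filter xs s y hyf
      have hlt := hD2lt s hs
      simp only [hbef, decide_eq_true_eq]
      omega
    rw [insertBy_append_left before x (List.flatMap g D1 ++ g x.1) (List.flatMap g D2) hpre,
      insertBy_all_before before x _ hsuf]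
    have hnotmem1 : ∀ s ∈ D1, ¬ (x.1 = s) := fun s hs h => by have := hD1gt s hs; omega
    have hnotmem2 : ∀ s ∈ D2, ¬ (x.1 = s) := fun s hs h => by have := hD2lt s hs; omega
    have hb1 : D1.flatMap (fun s => (xs ++ [x]).filter (fun p => p.1 == s)) = D1.flatMap g := by
      apply List.flatMap_congr
      intro s hs
      simp [hg, List.filter_append, beq_iff_eq, hnotmem1 s hs]
    have hb2 : D2.flatMap (fun s => (xs ++ [x]).filter (fun p => p.1 == s)) = D2.flatMap g := by
      apply List.flatMap_congr
      intro s hs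
      simp [hg, List.filter_append, beq_iff_eq, hnotmem2 s hs]
    have hbx : (xs ++ [x]).filter (fun p => p.1 == x.1) = g x.1 ++ [x] := by
      simp [hg, List.filter_append]
    rw [show (D1 ++ x.1 :: D2).flatMap (fun s => (xs ++ [x]).filter (fun p => p.1 == s)) =
          D1.flatMap (fun s => (xs ++ [x]).filter (fun p => p.1 == s)) ++
            ((xs ++ [x]).filter (fun p => p.1 == x.1) ++
              D2.flatMap (fun s => (xs ++ [x]).filter (fun p => p.1 == s))) from by
        simp [List.flatMap_append]]
    rw [hb1, hb2, hbx]
    simp [List.append_assoc]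

-- selecting by precomputed parallel scores is selecting by the score function
lemma zip_map_filter_fst {Q : Type} (l : List Q) (f : Q → Int) (s : Int) :
    ((l.zip (l.map f)).filter (fun p => p.2 == s)).map (fun p => p.1) =
      l.filter (fun qa => f qa == s) := by
  induction l with
  | nil => rfl
  | cons a t ih =>
    by_cases h : f a = s
    · simp [h, ih]
    · simp [h, ih]

-- xs[:k] commutes with map
lemma map_slice_to {α β : Type} (f : α → β) (xs : List α) (t : Int) :
    (PySem.List.slice xs none (some t)).map f = PySem.List.slice (xs.map f) none (some t) := by
  simp [PySem.List.slice, List.map_take]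

-- the countdown range is strictly decreasing
lemma pyRange_countdown_pairwise (a b : Int) :
    (PySem.List.pyRange a b (-1)).Pairwise (· > ·) := by
  rw [PySem.List.pyRange_neg_one_eq_reverse, List.pairwise_reverse]
  exact PySem.List.pairwise_lt_pyRange_one _ _

theorem find_qa_eq (qa_cache : List (List (String × String))) (keywords : List String)
    (top_k : Int) : find_qa qa_cache keywords top_k = find_qa_alt qa_cache keywords top_k := by
  show (PySem.List.slice
      (PySem.List.sorted
        (qa_cache.foldl (fun acc qa =>
          if 0 < scoreOf (keywords.map PySem.Str.lower) qa then
            acc ++ [(scoreOf (keywords.map PySem.Str.lower) qa, qa)] else acc) [])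
        (fun x => -x.1) false)
      none (some top_k)).map (fun p => p.2) =
    PySem.List.slice
      ((PySem.List.pyRange (PySem.List.len (keywords.map PySem.Str.lower)) 0 (-1)).foldl
        (fun acc s =>
          if PySem.Set.contains
              (PySem.Set.ofList
                ((qa_cache.map (fun qa => PySem.Str.lower ((qa.lookup "question").getD ""))).map
                  (fun q => ((keywords.map PySem.Str.lower).map
                    (fun k => if PySem.Str.isIn k q then (1 : Int) else 0)).sum))) s then
            acc ++ (((qa_cache.zip
                ((qa_cache.map (fun qa => PySem.Str.lower ((qa.lookup "question").getD ""))).map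
                  (fun q => ((keywords.map PySem.Str.lower).map
                    (fun k => if PySem.Str.isIn k q then (1 : Int) else 0)).sum))).filter
                (fun p => p.2 == s)).map (fun p => p.1))
          else acc) [])
      none (some top_k)
  set kw := keywords.map PySem.Str.lower with hkw
  set K : Int := (kw.length : Int) with hK
  set sc := scoreOf kw with hsc
  set D := PySem.List.pyRange K 0 (-1) with hD
  -- B's parallel score list is the pointwise score map
  have hS : (qa_cache.map (fun qa => PySem.Str.lower ((qa.lookup "question").getD ""))).map
      (fun q => (kw.map (fun k => if PySem.Str.isIn k q then (1 : Int) else 0)).sum) =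
      qa_cache.map sc := by
    rw [List.map_map]; rfl
  rw [hS]
  -- A's results list, as filter-then-map
  have hres : qa_cache.foldl (fun acc qa =>
      if 0 < sc qa then acc ++ [(sc qa, qa)] else acc) [] =
      (qa_cache.filter (fun qa => decide (0 < sc qa))).map (fun qa => (sc qa, qa)) := by
    have := PySem.List.foldl_append_if (fun qa => decide (0 < sc qa))
      (fun qa => (sc qa, qa)) qa_cache []
    simpa using this
  have hlen : PySem.List.len kw = K := by simp [hK, PySem.List.len_eq]
  -- B's guarded sweep, as flatMap of per-score selections
  have hBloop : (PySem.List.pyRange (PySem.List.len kw) 0 (-1)).foldl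
      (fun acc s =>
        if PySem.Set.contains (PySem.Set.ofList (qa_cache.map sc)) s then
          acc ++ ((qa_cache.zip (qa_cache.map sc)).filter (fun p => p.2 == s)).map (fun p => p.1)
        else acc) [] =
      D.flatMap (fun s => qa_cache.filter (fun qa => sc qa == s)) := by
    rw [hlen, ← hD]
    rw [show (fun (acc : List (List (String × String))) s =>
        if PySem.Set.contains (PySem.Set.ofList (qa_cache.map sc)) s then
          acc ++ ((qa_cache.zip (qa_cache.map sc)).filter (fun p => p.2 == s)).map (fun p => p.1)
        else acc) =
      (fun acc s => acc ++
        (if PySem.Set.contains (PySem.Set.ofList (qa_cache.map sc)) s then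
          ((qa_cache.zip (qa_cache.map sc)).filter (fun p => p.2 == s)).map (fun p => p.1)
        else [])) from funext fun acc => funext fun s => by split <;> simp]
    rw [PySem.List.foldl_append_eq_flatMap]
    simp only [List.nil_append]
    apply List.flatMap_congr
    intro s _
    by_cases hc : PySem.Set.contains (PySem.Set.ofList (qa_cache.map sc)) s = true
    · rw [if_pos hc]
      exact zip_map_filter_fst qa_cache sc s
    · rw [if_neg hc]
      have hmem : s ∉ qa_cache.map sc := by
        intro hsm
        exact hc ((PySem.Set.contains_iff _ _).mpr ((PySem.Set.mem_ofList _ _).mpr hsm))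
      symm
      rw [List.filter_eq_nil_iff]
      intro qa hqa
      simp only [beq_iff_eq]
      intro h
      exact hmem (List.mem_map.mpr ⟨qa, hqa, h⟩)
  -- apply the bucket characterisation of A's sort
  have hmemD : ∀ p ∈ (qa_cache.filter (fun qa => decide (0 < sc qa))).map
      (fun qa => (sc qa, qa)), p.1 ∈ D := by
    intro p hp
    obtain ⟨qa, hqa, rfl⟩ := List.mem_map.mp hp
    have h1 : 0 < sc qa := by simpa using (List.mem_filter.mp hqa).2
    have h2 : sc qa ≤ K := scoreOf_le kw qa
    rw [hD, PySem.List.mem_pyRange_neg_one]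
    exact ⟨h1, h2⟩
  have hsorted := sorted_eq_flatMap_buckets D (pyRange_countdown_pairwise K 0)
    ((qa_cache.filter (fun qa => decide (0 < sc qa))).map (fun qa => (sc qa, qa))) hmemD
  rw [hres, hsorted, map_slice_to, hBloop]
  congr 1
  rw [List.map_flatMap]
  apply List.flatMap_congr
  intro s hs
  have hspos : 0 < s := by
    rw [hD, PySem.List.mem_pyRange_neg_one] at hs
    exact hs.1
  rw [List.filter_map, List.map_map, List.filter_filter]
  have : ∀ qa ∈ qa_cache,
      (((fun p : Int × _ => p.1 == s) ∘ fun qa => (sc qa, qa)) qa && decide (0 < sc qa)) =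
      (sc qa == s) := by
    intro qa _
    by_cases hc : sc qa = s
    · simp [hc, hspos]
    · simp [hc]
  rw [List.filter_congr this]
  simp [Function.comp_def]

-- ===== VERDICT (by name: the statement is the Claim_ definition above) =====
theorem find_qa_spec : Claim_equal_find_qa := by
  intro qa_cache keywords top_k _
  unfold Spec_find_qa
  exact find_qa_eq qa_cache keywords top_k
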